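-- pv_equiv track=rewrite | github.com/daniel117622/iteration_spaces | polytope_optimized_algorithms.py | csr_to_ij
-- ===== SOURCE A (Python) =====
-- def csr_to_ij(csr_indptr, csr_indices):
--     n_rows = len(csr_indptr) - 1
--     ij_list = []
--     for i in range(n_rows):
--         start_idx = csr_indptr[i]
--         end_idx = csr_indptr[i+1]
--         for idx in range(start_idx, end_idx):
--             j = csr_indices[idx]
--             ij_list.append((i, j))
--     return ij_list
-- ===== SOURCE B (Python) =====
-- def csr_to_ij(csr_indptr, csr_indices):
--     if len(csr_indptr) < 2:
--         return []
--     ij_list = []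
--     row = 0
--     for idx in range(csr_indptr[0], csr_indptr[-1]):
--         while idx >= csr_indptr[row + 1]:
--             row += 1
--         ij_list.append((row, csr_indices[idx]))
--     return ij_list
-- ===== Notes on version B (the rewrite author's own statement) =====
-- stated objective: alternative
-- what changed: B replaces A's nested per-row loops with one flat pass over range(csr_indptr[0], csr_indptr[-1]) that carries a running row cursor advanced by a while loop; Pre_ restricts to valid CSR input (non-decreasing indptr), the function's natural domain, since the flat pass is only meaningful there.
-- outside the precondition, e.g. on csr_to_ij([5, 0, 2], [1, 2, 3]): A returns [(1, 1), (1, 2)], B returns []; on csr_to_ij([2, 0], [1, 2, 3]): A returns [], B returns []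
import Mathlib
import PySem

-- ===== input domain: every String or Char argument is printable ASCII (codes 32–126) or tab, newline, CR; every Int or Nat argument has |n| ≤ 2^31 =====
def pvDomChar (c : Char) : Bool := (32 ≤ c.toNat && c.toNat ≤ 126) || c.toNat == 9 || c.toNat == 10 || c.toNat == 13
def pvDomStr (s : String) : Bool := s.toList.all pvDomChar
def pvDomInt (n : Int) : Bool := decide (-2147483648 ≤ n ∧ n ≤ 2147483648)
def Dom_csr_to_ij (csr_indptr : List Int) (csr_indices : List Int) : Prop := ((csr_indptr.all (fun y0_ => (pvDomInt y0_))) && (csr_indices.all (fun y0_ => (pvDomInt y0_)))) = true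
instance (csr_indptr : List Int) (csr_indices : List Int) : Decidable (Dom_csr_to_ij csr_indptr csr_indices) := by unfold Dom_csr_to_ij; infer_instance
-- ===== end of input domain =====

-- B replaces A's nested per-row loops by one flat pass over the nonzero index range
-- with a running row cursor (alternative decomposition; same asymptotic cost);
-- Pre_ restricts to valid CSR indptr (non-decreasing), the function's natural domain.


-- ===== PORT A =====
-- literal port of A: outer loop over range(n_rows), indexed reads of indptr,
-- inner loop over range(start,end) appending to the accumulator.
-- csr_indptr[i] / csr_indptr[i+1] are always in range (i+1 ≤ n_rows = len-1);
-- csr_indices[idx] is total via pyGetD, exact under Pre_ (InRange).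
def csr_to_ij (csr_indptr : List Int) (csr_indices : List Int) : List (Int × Int) :=
  let n_rows : Int := (csr_indptr.length : Int) - 1
  (PySem.List.pyRange 0 n_rows 1).foldl
    (fun acc i =>
      let start_idx := PySem.List.pyGetD csr_indptr i 0
      let end_idx := PySem.List.pyGetD csr_indptr (i + 1) 0
      (PySem.List.pyRange start_idx end_idx 1).foldl
        (fun acc2 idx => acc2 ++ [(i, PySem.List.pyGetD csr_indices idx 0)]) acc)
    []

-- ===== PORT B =====
-- B's `while idx >= csr_indptr[row + 1]: row += 1` as structural recursion; the
-- `row + 1 < length` guard only makes the read total (under Pre_ it always holds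
-- when the loop body is reached).
def pvAdvance (csr_indptr : List Int) (idx : Int) (row : Nat) : Nat :=
  if _h : row + 1 < csr_indptr.length then
    if PySem.List.pyGetD csr_indptr ((row : Int) + 1) 0 ≤ idx then
      pvAdvance csr_indptr idx (row + 1)
    else row
  else row
termination_by csr_indptr.length - row

-- literal port of B: one flat pass over range(csr_indptr[0], csr_indptr[-1])
-- carrying (out, row); the while-loop is pvAdvance.
def csr_to_ij_alt (csr_indptr : List Int) (csr_indices : List Int) : List (Int × Int) :=
  if csr_indptr.length < 2 then []
  else
    ((PySem.List.pyRange (PySem.List.pyGetD csr_indptr 0 0)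
        (PySem.List.pyGetD csr_indptr (-1) 0) 1).foldl
      (fun (s : List (Int × Int) × Nat) idx =>
        let row := pvAdvance csr_indptr idx s.2
        (s.1 ++ [((row : Int), PySem.List.pyGetD csr_indices idx 0)], row))
      ([], 0)).1

-- ===== PRECONDITION & SPEC =====
-- Pre_ restricts to the natural domain of the task: a valid CSR indptr, i.e.
-- non-decreasing (on a non-monotone indptr A still returns the pairs of each
-- local range, which is not CSR data and B's flat pass does not reproduce), and
-- excludes exactly the index ranges on which A raises IndexError on csr_indices
-- (each nonempty range [s,e) must have both ends in Python's valid index range).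
def Pre_csr_to_ij (csr_indptr : List Int) (csr_indices : List Int) : Prop :=
  ∀ p ∈ csr_indptr.zip csr_indptr.tail,
    p.1 ≤ p.2 ∧ (p.1 < p.2 → PySem.Raise.InRange csr_indices.length p.1 ∧
                             PySem.Raise.InRange csr_indices.length (p.2 - 1))
instance (csr_indptr : List Int) (csr_indices : List Int) : Decidable (Pre_csr_to_ij csr_indptr csr_indices) := by unfold Pre_csr_to_ij; infer_instance

def pvWitness_csr_to_ij : List Int × List Int := ([0, 2, 2, 3], [5, 7, 9])

def Spec_csr_to_ij (csr_indptr : List Int) (csr_indices : List Int) (out : List (Int × Int)) : Prop := out = csr_to_ij_alt csr_indptr csr_indices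
instance (csr_indptr : List Int) (csr_indices : List Int) (out : List (Int × Int)) : Decidable (Spec_csr_to_ij csr_indptr csr_indices out) := by unfold Spec_csr_to_ij; infer_instance

-- ===== CLAIM (what is proved, stated in full; the proofs are below) =====
def Claim_equal_csr_to_ij : Prop := ∀ (csr_indptr : List Int) (csr_indices : List Int), Dom_csr_to_ij csr_indptr csr_indices → Pre_csr_to_ij csr_indptr csr_indices → Spec_csr_to_ij csr_indptr csr_indices (csr_to_ij csr_indptr csr_indices)

-- ===== LEMMAS AND PROOFS =====

-- the pairs A emits for row k (common specification of both ports)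
def pvChunk (csr_indptr csr_indices : List Int) (k : Nat) : List (Int × Int) :=
  (PySem.List.pyRange (csr_indptr.getD k 0) (csr_indptr.getD (k + 1) 0) 1).map
    (fun idx => ((k : Int), PySem.List.pyGetD csr_indices idx 0))

-- B's fold step, definitionally the lambda in csr_to_ij_alt
def pvStep (csr_indptr csr_indices : List Int) (s : List (Int × Int) × Nat) (idx : Int) :
    List (Int × Int) × Nat :=
  let row := pvAdvance csr_indptr idx s.2
  (s.1 ++ [((row : Int), PySem.List.pyGetD csr_indices idx 0)], row)

-- A equals the flatMap of the row chunks (no precondition needed)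
lemma A_eq_spec (ptr idxs : List Int) :
    csr_to_ij ptr idxs = (List.range (ptr.length - 1)).flatMap (pvChunk ptr idxs) := by
  unfold csr_to_ij
  rw [PySem.List.foldl_congr_mem _ _
    (fun acc i => acc ++
      (PySem.List.pyRange (PySem.List.pyGetD ptr i 0) (PySem.List.pyGetD ptr (i + 1) 0) 1).map
        (fun idx => (i, PySem.List.pyGetD idxs idx 0))) []
    (fun acc i _ => PySem.List.foldl_append_singleton_eq_map _ _ acc)]
  rw [PySem.List.foldl_append_eq_flatMap, List.nil_append]
  rw [PySem.List.pyRange_one, List.flatMap_map]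
  have hn : ((ptr.length : Int) - 1 - 0).toNat = ptr.length - 1 := by omega
  rw [hn]
  apply List.flatMap_congr
  intro k hk
  simp only [zero_add]
  have h2 : ((k : Int) + 1) = (((k + 1 : Nat)) : Int) := by omega
  rw [h2, PySem.List.pyGetD_natCast, PySem.List.pyGetD_natCast]
  rfl

-- consecutive monotonicity from Pre_
lemma pre_consec (ptr idxs : List Int) (h : Pre_csr_to_ij ptr idxs) (k : Nat)
    (hk : k + 1 < ptr.length) : ptr.getD k 0 ≤ ptr.getD (k + 1) 0 := by
  have hlen : (ptr.zip ptr.tail).length = ptr.length - 1 := by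
    simp [List.length_zip, List.length_tail]
  have hkz : k < (ptr.zip ptr.tail).length := by omega
  have hmem : (ptr.zip ptr.tail)[k] ∈ ptr.zip ptr.tail := List.getElem_mem hkz
  have h1 := (h _ hmem).1
  rw [List.getD_eq_getElem ptr 0 (show k < ptr.length by omega),
      List.getD_eq_getElem ptr 0 hk]
  simpa [List.getElem_zip, List.getElem_tail] using h1

-- full monotonicity
lemma pre_mono (ptr idxs : List Int) (h : Pre_csr_to_ij ptr idxs) :
    ∀ (j i : Nat), i ≤ j → j < ptr.length → ptr.getD i 0 ≤ ptr.getD j 0 := by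
  intro j
  induction j with
  | zero =>
    intro i hij _
    have hi0 : i = 0 := Nat.le_zero.mp hij
    subst hi0; rfl
  | succ n ih =>
    intro i hij hj
    rcases Nat.lt_or_ge i (n + 1) with hi | hi
    · exact le_trans (ih i (by omega) (by omega)) (pre_consec ptr idxs h n hj)
    · have hieq : i = n + 1 := by omega
      subst hieq; rfl

-- the cursor finds exactly row k for an index inside row k's range
lemma advance_eq (ptr idxs : List Int) (h : Pre_csr_to_ij ptr idxs) (k : Nat)
    (hk : k + 1 < ptr.length) (idx : Int) (h1 : ptr.getD k 0 ≤ idx)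
    (h2 : idx < ptr.getD (k + 1) 0) :
    ∀ r : Nat, r ≤ k → pvAdvance ptr idx r = k := by
  suffices H : ∀ (n r : Nat), r ≤ k → k - r = n → pvAdvance ptr idx r = k by
    intro r hr; exact H (k - r) r hr rfl
  intro n
  induction n with
  | zero =>
    intro r hr hd
    have hrk : r = k := by omega
    subst hrk
    rw [pvAdvance]
    have hcast : ((r : Int) + 1) = (((r + 1 : Nat)) : Int) := by omega
    rw [dif_pos hk, hcast, PySem.List.pyGetD_natCast, if_neg (by omega)]
  | succ n ih =>
    intro r hr hd
    have hrk : r < k := by omega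
    rw [pvAdvance]
    have hg : r + 1 < ptr.length := by omega
    have hcast : ((r : Int) + 1) = (((r + 1 : Nat)) : Int) := by omega
    have hle : ptr.getD (r + 1) 0 ≤ idx :=
      le_trans (pre_mono ptr idxs h k (r + 1) (by omega) (by omega)) h1
    rw [dif_pos hg, hcast, PySem.List.pyGetD_natCast, if_pos hle]
    exact ih (r + 1) (by omega) (by omega)

-- folding B's step across (a suffix of) row k's range appends row-k pairs and
-- leaves the cursor at most at k
lemma fold_chunk (ptr idxs : List Int) (h : Pre_csr_to_ij ptr idxs) (k : Nat)
    (hk : k + 1 < ptr.length) :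
    ∀ (c : Int), ptr.getD k 0 ≤ c → ∀ (r : Nat), r ≤ k → ∀ (a : List (Int × Int)),
      ∃ r' ≤ k,
        (PySem.List.pyRange c (ptr.getD (k + 1) 0) 1).foldl (pvStep ptr idxs) (a, r)
          = (a ++ (PySem.List.pyRange c (ptr.getD (k + 1) 0) 1).map
              (fun idx => ((k : Int), PySem.List.pyGetD idxs idx 0)), r') := by
  suffices H : ∀ (n : Nat) (c : Int), ptr.getD k 0 ≤ c → (ptr.getD (k + 1) 0 - c).toNat = n →
      ∀ (r : Nat), r ≤ k → ∀ (a : List (Int × Int)),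
      ∃ r' ≤ k,
        (PySem.List.pyRange c (ptr.getD (k + 1) 0) 1).foldl (pvStep ptr idxs) (a, r)
          = (a ++ (PySem.List.pyRange c (ptr.getD (k + 1) 0) 1).map
              (fun idx => ((k : Int), PySem.List.pyGetD idxs idx 0)), r') by
    intro c hc r hr a; exact H _ c hc rfl r hr a
  intro n
  induction n with
  | zero =>
    intro c hc hn r hr a
    have he : ptr.getD (k + 1) 0 ≤ c := by omega
    refine ⟨r, hr, ?_⟩
    rw [PySem.List.pyRange_one_eq_nil he]
    simp
  | succ n ih =>
    intro c hc hn r hr a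
    have hce : c < ptr.getD (k + 1) 0 := by omega
    rw [PySem.List.pyRange_one_cons hce, List.foldl_cons, List.map_cons]
    have hadv : pvAdvance ptr c r = k := advance_eq ptr idxs h k hk c hc hce r hr
    have hstep : pvStep ptr idxs (a, r) c
        = (a ++ [((k : Int), PySem.List.pyGetD idxs c 0)], k) := by
      simp [pvStep, hadv]
    rw [hstep]
    obtain ⟨r', hr', heq⟩ := ih (c + 1) (by omega) (by omega) k le_rfl _
    exact ⟨r', hr', by rw [heq, List.append_assoc]; rfl⟩

-- folding B's step across rows k..(len-2) of the flat range yields those chunks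
lemma tail_fold (ptr idxs : List Int) (h : Pre_csr_to_ij ptr idxs) :
    ∀ (m k r : Nat) (a : List (Int × Int)), r ≤ k → k + m + 2 = ptr.length →
      ((PySem.List.pyRange (ptr.getD k 0) (ptr.getD (ptr.length - 1) 0) 1).foldl
          (pvStep ptr idxs) (a, r)).1
        = a ++ (List.range' k (m + 1)).flatMap (pvChunk ptr idxs) := by
  intro m
  induction m with
  | zero =>
    intro k r a hr hlen
    have hL : ptr.length - 1 = k + 1 := by omega
    rw [hL]
    obtain ⟨r', _, heq⟩ := fold_chunk ptr idxs h k (by omega) (ptr.getD k 0) le_rfl r hr a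
    rw [heq]
    simp [pvChunk]
  | succ m ih =>
    intro k r a hr hlen
    have hk1 : k + 1 < ptr.length := by omega
    have hsplit : PySem.List.pyRange (ptr.getD k 0) (ptr.getD (ptr.length - 1) 0) 1
        = PySem.List.pyRange (ptr.getD k 0) (ptr.getD (k + 1) 0) 1
          ++ PySem.List.pyRange (ptr.getD (k + 1) 0) (ptr.getD (ptr.length - 1) 0) 1 :=
      PySem.List.pyRange_one_append _ _ _
        (pre_consec ptr idxs h k hk1)
        (pre_mono ptr idxs h (ptr.length - 1) (k + 1) (by omega) (by omega))
    rw [hsplit, List.foldl_append]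
    obtain ⟨r', hr', heq⟩ := fold_chunk ptr idxs h k hk1 (ptr.getD k 0) le_rfl r hr a
    rw [heq, ih (k + 1) r' _ (by omega) (by omega)]
    simp [List.range'_succ, pvChunk, List.append_assoc]

-- B equals the flatMap of the row chunks, under Pre_
lemma B_eq_spec (ptr idxs : List Int) (h : Pre_csr_to_ij ptr idxs) :
    csr_to_ij_alt ptr idxs = (List.range (ptr.length - 1)).flatMap (pvChunk ptr idxs) := by
  unfold csr_to_ij_alt
  by_cases hlen : ptr.length < 2
  · rw [if_pos hlen]
    have h0 : ptr.length - 1 = 0 := by omega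
    rw [h0]
    simp
  · rw [if_neg hlen]
    have h0 : PySem.List.pyGetD ptr 0 0 = ptr.getD 0 0 := by
      simpa using PySem.List.pyGetD_natCast ptr 0 0
    have hlast : PySem.List.pyGetD ptr (-1) 0 = ptr.getD (ptr.length - 1) 0 := by
      rw [show ((-1 : Int)) = -((1 : Nat) : Int) by norm_num,
          PySem.List.pyGetD_neg_natCast ptr 1 0 (by omega) (by omega),
          List.getD_eq_getElem ptr 0 (by omega)]
    have hfold : (fun (s : List (Int × Int) × Nat) idx =>
        let row := pvAdvance ptr idx s.2
        (s.1 ++ [((row : Int), PySem.List.pyGetD idxs idx 0)], row)) = pvStep ptr idxs := rfl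
    rw [h0, hlast, hfold,
        tail_fold ptr idxs h (ptr.length - 2) 0 0 [] le_rfl (by omega),
        List.nil_append, List.range_eq_range',
        show ptr.length - 2 + 1 = ptr.length - 1 by omega]

-- ===== VERDICT (by name: the statement is the Claim_ definition above) =====
theorem csr_to_ij_spec : Claim_equal_csr_to_ij := by
  intro ptr idxs _ hpre
  unfold Spec_csr_to_ij
  rw [A_eq_spec, B_eq_spec ptr idxs hpre]
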